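-- pv_equiv track=rewrite | github.com/IgnacioB75/python-prjs | aurebesh.py | es_to_aurebesh
-- ===== SOURCE A (Python) =====
-- es_dict = { # DICCIONARIO EN ESPAÑOL
--     "A": "Aurek",
--     "B": "Besh",
--     "C": "Cresh",
--     "D": "Dorn",
--     "E": "Esk",
--     "F": "Forn",
--     "G": "Greer",
--     "H": "Herf",
--     "I": "Isk",
--     "J": "Jenth",
--     "K": "Krill",
--     "L": "Leth",
--     "M": "Mern",
--     "N": "Nern",
--     "O": "Osk",
--     "P": "Peth",
--     "Q": "Qek",
--     "R": "Resh",
--     "S": "Senth",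
--     "T": "Trill",
--     "U": "Usk",
--     "V": "Vev",
--     "W": "Wesk",
--     "X": "Xesh",
--     "Y": "Yirt",
--     "Z": "Zerek",
--     "OO": "Orenth",
--     "SH": "Shen",
--     "TH": "Thesh",
--     "AE": "Enth",
--     "EO": "Onith",
--     "NG": "Nen",
-- }
--
-- def es_to_aurebesh(text):
--     resultado = ""
--     i = 0
--     text = text.upper()
--     while i <= len(text) - 1:
--         if i + 1 < len(text) and f"{text[i]}{text[i+1]}" in es_dict:
--             resultado += f"{es_dict.get(f'{text[i]}{text[i+1]}')} "
--             i += 1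
--         else:
--             resultado += f"{es_dict.get(text[i], text[i])} "
--         i += 1
--     return resultado.strip()
-- ===== SOURCE B (Python) =====
-- es_dict = { # DICCIONARIO EN ESPAÑOL
--     "A": "Aurek", "B": "Besh", "C": "Cresh", "D": "Dorn", "E": "Esk",
--     "F": "Forn", "G": "Greer", "H": "Herf", "I": "Isk", "J": "Jenth",
--     "K": "Krill", "L": "Leth", "M": "Mern", "N": "Nern", "O": "Osk",
--     "P": "Peth", "Q": "Qek", "R": "Resh", "S": "Senth", "T": "Trill",
--     "U": "Usk", "V": "Vev", "W": "Wesk", "X": "Xesh", "Y": "Yirt",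
--     "Z": "Zerek",
--     "OO": "Orenth", "SH": "Shen", "TH": "Thesh",
--     "AE": "Enth", "EO": "Onith", "NG": "Nen",
-- }
--
--
-- def es_to_aurebesh(text):
--     # Single pass with a one-character pending-lookahead state: no indexing,
--     # no slicing; syllables are collected in a list and joined once.
--     out = []
--     pending = None
--     for c in text.upper():
--         if pending is not None and pending + c in es_dict:
--             out.append(es_dict[pending + c])
--             pending = None
--         else:
--             if pending is not None:
--                 out.append(es_dict.get(pending, pending))
--             pending = c
--     if pending is not None:
--         out.append(es_dict.get(pending, pending))
--     return " ".join(out).strip()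
-- ===== Notes on version B (the rewrite author's own statement) =====
-- stated objective: faster
-- what changed: B replaces A's manual index-stepping while-loop with quadratic string concatenation by a single fold over the characters that carries a one-character pending-lookahead state (emit the digraph syllable when pending+current is a key, otherwise flush the pending character's syllable), collecting syllables in a list and joining them once at the end.
import Mathlib
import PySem

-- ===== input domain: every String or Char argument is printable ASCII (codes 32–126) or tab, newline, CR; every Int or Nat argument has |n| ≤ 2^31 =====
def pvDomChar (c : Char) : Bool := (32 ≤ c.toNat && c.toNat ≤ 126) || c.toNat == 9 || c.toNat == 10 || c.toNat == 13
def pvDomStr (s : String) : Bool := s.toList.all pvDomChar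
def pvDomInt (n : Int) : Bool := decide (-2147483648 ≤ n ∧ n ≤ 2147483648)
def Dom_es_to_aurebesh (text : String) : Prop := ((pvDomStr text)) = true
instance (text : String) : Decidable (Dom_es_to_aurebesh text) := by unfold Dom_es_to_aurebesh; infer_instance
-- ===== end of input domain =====

-- B replaces A's index-stepping loop with quadratic string accumulation by a single fold
-- with a one-character pending-lookahead state, collecting syllables and joining once.

-- the shared module-level es_dict (keys/values as lists of code points)
def esDict : PySem.Dict (List Char) (List Char) := PySem.Dict.mk [
  ("A".toList, "Aurek".toList), ("B".toList, "Besh".toList), ("C".toList, "Cresh".toList),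
  ("D".toList, "Dorn".toList), ("E".toList, "Esk".toList), ("F".toList, "Forn".toList),
  ("G".toList, "Greer".toList), ("H".toList, "Herf".toList), ("I".toList, "Isk".toList),
  ("J".toList, "Jenth".toList), ("K".toList, "Krill".toList), ("L".toList, "Leth".toList),
  ("M".toList, "Mern".toList), ("N".toList, "Nern".toList), ("O".toList, "Osk".toList),
  ("P".toList, "Peth".toList), ("Q".toList, "Qek".toList), ("R".toList, "Resh".toList),
  ("S".toList, "Senth".toList), ("T".toList, "Trill".toList), ("U".toList, "Usk".toList),
  ("V".toList, "Vev".toList), ("W".toList, "Wesk".toList), ("X".toList, "Xesh".toList),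
  ("Y".toList, "Yirt".toList), ("Z".toList, "Zerek".toList),
  ("OO".toList, "Orenth".toList), ("SH".toList, "Shen".toList), ("TH".toList, "Thesh".toList),
  ("AE".toList, "Enth".toList), ("EO".toList, "Onith".toList), ("NG".toList, "Nen".toList)]

-- ===== PORT A =====
-- A's while loop: index i, accumulator resultado; digraph test = membership of text[i]text[i+1] in es_dict
def esLoopA (cs : List Char) (i : Nat) (res : List Char) : List Char :=
  if h : i < cs.length then
    if h2 : i + 1 < cs.length then
      match esDict.get? [cs[i], cs[i+1]] with
      | some v => esLoopA cs (i + 2) (res ++ v ++ [' '])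
      | none   => esLoopA cs (i + 1) (res ++ esDict.getD [cs[i]] [cs[i]] ++ [' '])
    else esLoopA cs (i + 1) (res ++ esDict.getD [cs[i]] [cs[i]] ++ [' '])
  else res
termination_by cs.length - i

def es_to_aurebesh (text : String) : String :=
  String.ofList (PySem.Chars.strip (esLoopA (PySem.Chars.upper text.toList) 0 []))

-- ===== PORT B =====
-- B's loop body: state = (syllables so far, pending character)
def esStepB (st : List (List Char) × Option Char) (c : Char) : List (List Char) × Option Char :=
  match st.2 with
  | some p =>
    if (esDict.get? [p, c]).isSome then (st.1 ++ [esDict.getD [p, c] []], none)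
    else (st.1 ++ [esDict.getD [p] [p]], some c)
  | none => (st.1, some c)

-- B's final flush of the pending character
def esFinish (st : List (List Char) × Option Char) : List (List Char) :=
  match st.2 with
  | some p => st.1 ++ [esDict.getD [p] [p]]
  | none => st.1

def es_to_aurebesh_alt (text : String) : String :=
  String.ofList (PySem.Chars.strip (PySem.Chars.join [' ']
    (esFinish ((PySem.Chars.upper text.toList).foldl esStepB ([], none)))))

-- ===== PRECONDITION & SPEC =====
def Spec_es_to_aurebesh (text : String) (out : String) : Prop := out = es_to_aurebesh_alt text
instance (text : String) (out : String) : Decidable (Spec_es_to_aurebesh text out) := by unfold Spec_es_to_aurebesh; infer_instance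

-- ===== CLAIM (what is proved, stated in full; the proofs are below) =====
def Claim_equal_es_to_aurebesh : Prop := ∀ (text : String), Dom_es_to_aurebesh text → Spec_es_to_aurebesh text (es_to_aurebesh text)

-- ===== LEMMAS AND PROOFS =====
set_option maxRecDepth 8192

-- proof-side description of the greedy tokenization's syllable list
def esVals : List Char → List (List Char)
  | [] => []
  | [c] => [esDict.getD [c] [c]]
  | c :: d :: rest =>
    if (esDict.get? [c, d]).isSome then esDict.getD [c, d] [] :: esVals rest
    else esDict.getD [c] [c] :: esVals (d :: rest)

-- A's loop from index i produces exactly the syllables of the remaining suffix, each followed by a space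
theorem esLoopA_eq_vals (cs : List Char) (i : Nat) (res : List Char) :
    esLoopA cs i res = res ++ ((esVals (cs.drop i)).map (fun v => v ++ [' '])).flatten := by
  rw [esLoopA]
  split
  · rename_i h
    have hdrop : cs.drop i = cs[i] :: cs.drop (i + 1) := List.drop_eq_getElem_cons h
    split
    · rename_i h2
      have hdrop2 : cs.drop (i + 1) = cs[i + 1] :: cs.drop (i + 2) := List.drop_eq_getElem_cons h2
      rw [hdrop, hdrop2, esVals]
      split
      · rename_i v hv
        simp only [hv, Option.isSome_some, if_true]
        rw [esLoopA_eq_vals cs (i + 2) (res ++ v ++ [' '])]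
        simp only [List.map_cons, List.flatten_cons, PySem.Dict.getD, hv, Option.getD_some,
          List.append_assoc]
      · rename_i hv
        simp only [hv, Option.isSome_none, Bool.false_eq_true, if_false]
        rw [esLoopA_eq_vals cs (i + 1) (res ++ esDict.getD [cs[i]] [cs[i]] ++ [' ']), hdrop2]
        simp only [List.map_cons, List.flatten_cons, List.append_assoc]
    · rename_i h2
      have hnil : cs.drop (i + 1) = ([] : List Char) := by
        apply List.drop_eq_nil_of_le; omega
      rw [hdrop, hnil]
      rw [esLoopA_eq_vals cs (i + 1) (res ++ esDict.getD [cs[i]] [cs[i]] ++ [' '])]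
      rw [hnil]
      simp only [esVals, List.map_cons, List.map_nil, List.flatten_cons, List.flatten_nil,
        List.append_nil, List.append_assoc]
  · rename_i h
    have hnil : cs.drop i = ([] : List Char) := by
      apply List.drop_eq_nil_of_le; omega
    simp [hnil, esVals]
termination_by cs.length - i
decreasing_by all_goals omega

-- B's fold with pending state computes the same syllable list
theorem esFold_eq_vals (cs : List Char) (acc : List (List Char)) (opt : Option Char) :
    esFinish (cs.foldl esStepB (acc, opt)) =
      acc ++ esVals (match opt with | some p => p :: cs | none => cs) := by
  induction cs generalizing acc opt with
  | nil =>
    cases opt <;> simp [esFinish, esVals]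
  | cons c rest ih =>
    cases opt with
    | none =>
      simp only [List.foldl_cons, esStepB]
      exact ih acc (some c)
    | some p =>
      simp only [List.foldl_cons, esStepB]
      by_cases hd : (esDict.get? [p, c]).isSome
      · simp only [hd, if_true]
        rw [ih (acc ++ [esDict.getD [p, c] []]) none]
        simp [esVals, hd]
      · simp only [hd, Bool.false_eq_true, if_false]
        rw [ih (acc ++ [esDict.getD [p] [p]]) (some c)]
        simp [esVals, hd]

-- flatten of "syllable + space" is join-with-space plus one trailing space (or empty)
theorem flatten_space (vs : List (List Char)) :
    (vs.map (fun v => v ++ [' '])).flatten =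
      (if vs = [] then [] else PySem.Chars.join [' '] vs ++ [' ']) := by
  induction vs with
  | nil => simp
  | cons v rest ih =>
    cases rest with
    | nil => simp [PySem.Chars.join_singleton]
    | cons w rs =>
      simp only [List.map_cons, List.flatten_cons] at ih ⊢
      rw [ih]
      simp [PySem.Chars.join_cons_cons]

theorem strip_append_space (x : List Char) :
    PySem.Chars.strip (x ++ [' ']) = PySem.Chars.strip x := by
  simp only [PySem.Chars.strip, PySem.Chars.lstrip, PySem.Chars.rstrip, List.dropWhile_append]
  split
  · rename_i he
    simp only [List.isEmpty_iff] at he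
    simp [he, List.dropWhile, PySem.Chars.isspace]
  · simp [List.reverse_append, PySem.Chars.isspace]

-- ===== VERDICT (by name: the statement is the Claim_ definition above) =====
theorem es_to_aurebesh_spec : Claim_equal_es_to_aurebesh := by
  intro text _
  unfold Spec_es_to_aurebesh es_to_aurebesh es_to_aurebesh_alt
  rw [esLoopA_eq_vals, esFold_eq_vals]
  simp only [List.drop_zero, List.nil_append]
  rw [flatten_space]
  split
  · rename_i h; simp [h]
  · rw [strip_append_space]
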